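-- pv_equiv track=rewrite | github.com/adityavgupta/ECE448-CS440 | mp4/viterbi.py | baseline
-- ===== SOURCE A (Python) =====
-- from collections import Counter
--
-- def baseline(train, test):
--     '''
--     TODO: implement the baseline algorithm. This function has time out limitation of 1 minute.
--     input:  training data (list of sentences, with tags on the words)
--             E.g. [[(word1, tag1), (word2, tag2)...], [(word1, tag1), (word2, tag2)...]...]
--             test data (list of sentences, no tags on the words)
--             E.g  [[word1,word2,...][word1,word2,...]]
--     output: list of sentences, each sentence is a list of (word,tag) pairs.
--             E.g. [[(word1, tag1), (word2, tag2)...], [(word1, tag1), (word2, tag2)...]...]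
--     '''
--     predicts = []
--     word_tag = {}
--     tag_ct = Counter()
--     for sentence in train:
--         for w_tag in sentence:
--             w, t = w_tag
--             if w not in word_tag:
--                 word_tag[w] = Counter()
--
--             word_tag[w][t] += 1
--             tag_ct[t] += 1
--
--     t_max = max(tag_ct.keys(), key=(lambda key: tag_ct[key]))
--
--     for sentence in test:
--         tag_pred = []
--         for word in sentence:
--             if word in word_tag:
--                 max_t = max((word_tag[word]).keys(), key=lambda key:word_tag[word][key])
--                 tag_pred.append((word, max_t))
--             else:
--                 tag_pred.append((word, t_max))
--         predicts.append(tag_pred)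
--
--     return predicts
-- ===== SOURCE B (Python) =====
-- from collections import Counter
--
-- def baseline(train, test):
--     # Flatten once, count (word, tag) pairs and tags with Counter, then build a
--     # per-word best-tag index in a single scan so the test loop is pure lookup.
--     pairs = [wt for sentence in train for wt in sentence]
--     tag_ct = Counter(t for _, t in pairs)
--     t_max = max(tag_ct, key=tag_ct.get)
--     pair_ct = Counter(pairs)
--     best = {}
--     for (w, t), c in pair_ct.items():
--         if w not in best or c > best[w][1]:
--             best[w] = (t, c)
--     return [[(word, best[word][0] if word in best else t_max) for word in sentence]
--             for sentence in test]
-- ===== Notes on version B (the rewrite author's own statement) =====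
-- stated objective: alternative
-- what changed: A keeps a dict of per-word tag Counters and re-runs max() over a word's tag counts for every test-token occurrence; B flattens the training data into one (word,tag) Counter, builds a best-tag-per-word index in a single scan of its items, and the test loop becomes a plain dict lookup.
import Mathlib
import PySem

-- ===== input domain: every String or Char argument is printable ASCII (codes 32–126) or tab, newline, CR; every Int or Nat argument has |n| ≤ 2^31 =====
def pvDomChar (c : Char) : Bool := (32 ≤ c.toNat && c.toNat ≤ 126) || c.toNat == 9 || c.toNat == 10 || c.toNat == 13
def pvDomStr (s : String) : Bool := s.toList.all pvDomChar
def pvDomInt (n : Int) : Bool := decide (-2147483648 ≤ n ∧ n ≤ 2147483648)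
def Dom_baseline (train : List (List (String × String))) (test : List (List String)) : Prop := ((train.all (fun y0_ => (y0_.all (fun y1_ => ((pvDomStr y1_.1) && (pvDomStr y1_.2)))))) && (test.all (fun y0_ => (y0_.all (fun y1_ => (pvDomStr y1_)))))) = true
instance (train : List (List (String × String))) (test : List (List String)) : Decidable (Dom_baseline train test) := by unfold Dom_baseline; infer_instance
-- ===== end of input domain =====

-- B replaces A's nested per-word Counter dict and per-test-token max scan by one flat
-- (word, tag) Counter plus a single-scan best-tag index, making the test loop pure lookup.

-- ===== PORT A =====
-- one training step: the body of A's inner 'for w_tag in sentence' loop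
def aStep (st : PySem.Dict String (PySem.Dict String Int) × PySem.Dict String Int)
    (p : String × String) :
    PySem.Dict String (PySem.Dict String Int) × PySem.Dict String Int :=
  let word_tag := if st.1.contains p.1 then st.1 else st.1.insert p.1 PySem.Dict.empty
  (word_tag.modify p.1 PySem.Dict.empty (fun c => c.modify p.2 0 (· + 1)),
   st.2.modify p.2 0 (· + 1))

def baseline (train : List (List (String × String))) (test : List (List String)) :
    List (List (String × String)) :=
  let st := train.foldl (fun st sentence => sentence.foldl aStep st)
      (PySem.Dict.empty, PySem.Dict.empty)
  let word_tag := st.1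
  let tag_ct := st.2
  match PySem.List.max? tag_ct.keys (fun k => tag_ct.getD k 0) with
  | none => []  -- Python raises ValueError here (max of no tags); excluded by Pre_
  | some t_max =>
    test.foldl (fun predicts sentence =>
      predicts ++ [sentence.foldl (fun tag_pred word =>
        match word_tag.get? word with
        | some c =>
          match PySem.List.max? c.keys (fun k => c.getD k 0) with
          | some max_t => tag_pred ++ [(word, max_t)]
          | none => tag_pred ++ [(word, t_max)]  -- unreachable: stored counters are nonempty
        | none => tag_pred ++ [(word, t_max)]) []]) []

-- ===== PORT B =====
-- one step of B's best-tag index scan over pair_ct.items()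
def bStep (best : PySem.Dict String (String × Int)) (p : (String × String) × Int) :
    PySem.Dict String (String × Int) :=
  match best.get? p.1.1 with
  | none => best.insert p.1.1 (p.1.2, p.2)
  | some q => if q.2 < p.2 then best.insert p.1.1 (p.1.2, p.2) else best

def baseline_alt (train : List (List (String × String))) (test : List (List String)) :
    List (List (String × String)) :=
  let pairs := train.flatten
  let tag_ct := PySem.Dict.counter (pairs.map Prod.snd)
  match PySem.List.max? tag_ct.keys (fun k => tag_ct.getD k 0) with
  | none => []  -- Python raises ValueError here; excluded by Pre_
  | some t_max =>
    let pair_ct := PySem.Dict.counter pairs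
    let best := pair_ct.items.foldl bStep PySem.Dict.empty
    test.map (fun sentence => sentence.map (fun word =>
      (word, match best.get? word with
             | some q => q.1
             | none => t_max)))

-- ===== PRECONDITION & SPEC =====
-- Pre_ excludes inputs whose training data contains no (word, tag) pair at all:
-- there Python A (and B alike) raises ValueError in max() over an empty tag counter.
def Pre_baseline (train : List (List (String × String))) (test : List (List String)) : Prop :=
  train.flatten ≠ []
instance (train : List (List (String × String))) (test : List (List String)) : Decidable (Pre_baseline train test) := by unfold Pre_baseline; infer_instance
def pvWitness_baseline : (List (List (String × String))) × List (List String) :=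
  ([[("a", "N"), ("b", "V")], [("a", "N")]], [["a", "b", "c"]])

def Spec_baseline (train : List (List (String × String))) (test : List (List String)) (out : List (List (String × String))) : Prop := out = baseline_alt train test
instance (train : List (List (String × String))) (test : List (List String)) (out : List (List (String × String))) : Decidable (Spec_baseline train test out) := by unfold Spec_baseline; infer_instance

-- ===== CLAIM (what is proved, stated in full; the proofs are below) =====
def Claim_equal_baseline : Prop := ∀ (train : List (List (String × String))) (test : List (List String)), Dom_baseline train test → Pre_baseline train test → Spec_baseline train test (baseline train test)

-- ===== LEMMAS AND PROOFS =====

-- the tags attached to word w in the flat training pair list, in order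
def tagsOf (ps : List (String × String)) (w : String) : List String :=
  (ps.filter (fun p => p.1 == w)).map Prod.snd

lemma aFold_snd (ps : List (String × String))
    (st : PySem.Dict String (PySem.Dict String Int) × PySem.Dict String Int) :
    (List.foldl aStep st ps).2
      = List.foldl (fun d t => d.modify t 0 (· + 1)) st.2 (ps.map Prod.snd) := by
  induction ps generalizing st with
  | nil => rfl
  | cons p ps ih => simpa [aStep] using ih _

lemma aStep_get?_self (st : PySem.Dict String (PySem.Dict String Int) × PySem.Dict String Int)
    (p : String × String) :
    (aStep st p).1.get? p.1
      = some ((st.1.getD p.1 PySem.Dict.empty).modify p.2 0 (· + 1)) := by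
  by_cases hc : st.1.contains p.1 = true
  · simp [aStep, hc, PySem.Dict.modify, PySem.Dict.get?_insert_self, PySem.Dict.getD]
  · have h1 : st.1.getD p.1 PySem.Dict.empty = PySem.Dict.empty :=
      PySem.Dict.getD_of_not_contains _ _ (by simpa using hc)
    simp [aStep, hc, PySem.Dict.modify, PySem.Dict.get?_insert_self,
      PySem.Dict.getD_insert_self, h1]

lemma aStep_get?_ne (st : PySem.Dict String (PySem.Dict String Int) × PySem.Dict String Int)
    (p : String × String) (w : String) (hw : w ≠ p.1) :
    (aStep st p).1.get? w = st.1.get? w := by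
  simp only [aStep, PySem.Dict.modify]
  rw [PySem.Dict.get?_insert_of_ne _ _ hw]
  by_cases hc : st.1.contains p.1 = true
  · simp [hc]
  · simp [hc, PySem.Dict.get?_insert_of_ne _ _ hw]

lemma aFold_fst_get? (ps : List (String × String)) (w : String) :
    (List.foldl aStep (PySem.Dict.empty, PySem.Dict.empty) ps).1.get? w
      = if w ∈ ps.map Prod.fst then some (PySem.Dict.counter (tagsOf ps w)) else none := by
  induction ps using List.reverseRecOn with
  | nil => simp [PySem.Dict.get?_empty]
  | append_singleton ps p ih =>
    rw [List.foldl_append, List.foldl_cons, List.foldl_nil]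
    by_cases hw : w = p.1
    · rw [show p = (w, p.2) by rw [hw]] at *
      rw [aStep_get?_self]
      have htags : tagsOf (ps ++ [(w, p.2)]) w = tagsOf ps w ++ [p.2] := by
        simp [tagsOf, List.filter_append]
      by_cases hmem : w ∈ ps.map Prod.fst
      · have : (List.foldl aStep (PySem.Dict.empty, PySem.Dict.empty) ps).1.getD w PySem.Dict.empty
            = PySem.Dict.counter (tagsOf ps w) :=
          PySem.Dict.getD_of_get?_eq_some _ _ (by rw [ih]; simp [hmem])
        simp [this, htags, PySem.Dict.counter_append_singleton]
      · have hnone : (List.foldl aStep (PySem.Dict.empty, PySem.Dict.empty) ps).1.get? w = none := by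
          rw [ih]; simp [hmem]
        have hget := PySem.Dict.getD_of_get?_eq_none _ PySem.Dict.empty hnone
        have htagsnil : tagsOf ps w = [] := by
          simp only [tagsOf, List.map_eq_nil_iff, List.filter_eq_nil_iff]
          intro q hq
          simp only [beq_iff_eq]
          intro h; exact hmem (by simpa [← h] using List.mem_map_of_mem (f := Prod.fst) hq)
        rw [hget, htags, htagsnil]
        have : PySem.Dict.counter ([] ++ [p.2])
            = (PySem.Dict.empty : PySem.Dict String Int).modify p.2 0 (· + 1) := by
          rw [PySem.Dict.counter_append_singleton]; rfl
        simp only [List.nil_append] at this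
        simp [this]
    · rw [aStep_get?_ne _ _ _ hw, ih]
      have htags : tagsOf (ps ++ [p]) w = tagsOf ps w := by
        simp only [tagsOf, List.filter_append, List.filter_cons, List.filter_nil]
        have : (p.1 == w) = false := by simpa using fun h => hw h.symm
        simp [this]
      have hmem : (w ∈ List.map Prod.fst (ps ++ [p])) ↔ w ∈ List.map Prod.fst ps := by
        simp [List.mem_append, hw]
      rw [if_congr hmem rfl rfl, htags]

lemma bFold_get? (L : List ((String × String) × Int)) (w : String) :
    (List.foldl bStep PySem.Dict.empty L).get? w
      = PySem.List.max? ((L.filter (fun p => p.1.1 == w)).map (fun p => (p.1.2, p.2)))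
          Prod.snd := by
  induction L using List.reverseRecOn with
  | nil => simp [PySem.List.max?, PySem.Dict.get?_empty]
  | append_singleton L p ih =>
    rw [List.foldl_append, List.foldl_cons, List.foldl_nil]
    by_cases hw : p.1.1 = w
    · have hfil : (L ++ [p]).filter (fun p => p.1.1 == w)
          = L.filter (fun p => p.1.1 == w) ++ [p] := by
        simp [List.filter_append, hw]
      rw [hfil, List.map_append]
      simp only [PySem.List.max?, List.foldl_append, List.foldl_cons, List.foldl_nil,
        List.map_cons, List.map_nil]
      rw [← PySem.List.max?, ← ih]
      cases hg : (List.foldl bStep PySem.Dict.empty L).get? w with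
      | none => simp [bStep, hw, hg, PySem.Dict.get?_insert_self]
      | some q =>
        by_cases hlt : q.2 < p.2
        · simp [bStep, hw, hg, hlt, PySem.Dict.get?_insert_self]
        · simp [bStep, hw, hg, hlt]
    · have hfil : (L ++ [p]).filter (fun p => p.1.1 == w)
          = L.filter (fun p => p.1.1 == w) := by
        simp [List.filter_append, hw]
      rw [hfil, ← ih]
      cases hg : (List.foldl bStep PySem.Dict.empty L).get? p.1.1 with
      | none => simp [bStep, hg, PySem.Dict.get?_insert_of_ne _ _ (fun h => hw h.symm)]
      | some q =>
        by_cases hlt : q.2 < p.2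
        · simp [bStep, hg, hlt, PySem.Dict.get?_insert_of_ne _ _ (fun h => hw h.symm)]
        · simp [bStep, hg, hlt]

lemma max?_map {α β γ : Type} [LT γ] [DecidableLT γ] (f : α → β) (key : β → γ)
    (xs : List α) :
    PySem.List.max? (xs.map f) key = (PySem.List.max? xs (fun x => key (f x))).map f := by
  simp only [PySem.List.max?]
  suffices h : ∀ (acc : Option α),
      List.foldl (fun acc x => match acc with
        | none => some x
        | some m => if key m < key x then some x else some m) (acc.map f) (xs.map f)
      = (List.foldl (fun acc x => match acc with
        | none => some x
        | some m => if key (f m) < key (f x) then some x else some m) acc xs).map f by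
    simpa using h none
  induction xs with
  | nil => intro acc; rfl
  | cons x xs ih =>
    intro acc
    cases acc with
    | none => simpa using ih (some x)
    | some m =>
      by_cases hlt : key (f m) < key (f x)
      · simpa [hlt] using ih (some x)
      · simpa [hlt] using ih (some m)

lemma max?_ne_none {α γ : Type} [LT γ] [DecidableLT γ] (key : α → γ) (xs : List α)
    (h : xs ≠ []) : PySem.List.max? xs key ≠ none := by
  cases xs with
  | nil => exact absurd rfl h
  | cons x xs =>
    simp only [PySem.List.max?, List.foldl_cons]
    clear h
    suffices h : ∀ (m : α), List.foldl (fun acc x => match acc with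
        | none => some x
        | some m => if key m < key x then some x else some m) (some m) xs ≠ none by
      exact h x
    induction xs with
    | nil => intro m; simp
    | cons y ys ih =>
      intro m
      by_cases hlt : key m < key y
      · simpa [hlt] using ih y
      · simpa [hlt] using ih m

lemma tagsOf_cons (p : String × String) (ps : List (String × String)) (w : String) :
    tagsOf (p :: ps) w = if p.1 = w then p.2 :: tagsOf ps w else tagsOf ps w := by
  by_cases h : p.1 = w <;> simp [tagsOf, h]

lemma count_pair (ps : List (String × String)) (w t : String) :
    List.count (w, t) ps = List.count t (tagsOf ps w) := by
  induction ps with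
  | nil => rfl
  | cons p ps ih =>
    rw [List.count_cons, tagsOf_cons]
    by_cases h1 : p.1 = w
    · by_cases h2 : p.2 = t
      · have hp : p = (w, t) := by cases p; simp_all
        simp [hp, ih]
      · have hp : p ≠ (w, t) := by intro h; subst h; exact h2 rfl
        simp [h1, hp, h2, ih]
    · have hp : p ≠ (w, t) := by intro h; subst h; exact h1 rfl
      simp [h1, hp, ih]

lemma ofList_filter_map (ps : List (String × String)) (w : String) :
    ((PySem.Set.ofList ps).filter (fun k => k.1 == w)).map Prod.snd
      = PySem.Set.ofList (tagsOf ps w) := by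
  induction ps using List.reverseRecOn with
  | nil => rfl
  | append_singleton ps p ih =>
    rw [PySem.Set.ofList_append_singleton]
    by_cases hw : p.1 = w
    · have htags : tagsOf (ps ++ [p]) w = tagsOf ps w ++ [p.2] := by
        simp [tagsOf, List.filter_append, hw]
      rw [htags, PySem.Set.ofList_append_singleton]
      have hmemiff : p ∈ PySem.Set.ofList ps ↔ p.2 ∈ PySem.Set.ofList (tagsOf ps w) := by
        rw [PySem.Set.mem_ofList, PySem.Set.mem_ofList]
        constructor
        · intro hp
          exact List.mem_map_of_mem (List.mem_filter.2 ⟨hp, by simp [hw]⟩)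
        · intro hp
          obtain ⟨q, hq, hq2⟩ := List.mem_map.1 hp
          have := List.mem_filter.1 hq
          have hq1 : q.1 = w := by simpa using this.2
          have : q = p := by cases p; cases q; simp_all
          exact this ▸ this.symm ▸ (List.mem_filter.1 hq).1
      by_cases hmem : p ∈ PySem.Set.ofList ps
      · rw [PySem.Set.add_of_mem hmem, PySem.Set.add_of_mem (hmemiff.1 hmem), ih]
      · rw [PySem.Set.add_of_not_mem hmem,
          PySem.Set.add_of_not_mem (fun h => hmem (hmemiff.2 h))]
        simp only [List.filter_append, List.map_append, ih]
        simp [hw]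
    · have htags : tagsOf (ps ++ [p]) w = tagsOf ps w := by
        have : (p.1 == w) = false := by simpa using hw
        simp [tagsOf, List.filter_append, this]
      rw [htags, ← ih]
      by_cases hmem : p ∈ PySem.Set.ofList ps
      · rw [PySem.Set.add_of_mem hmem]
      · rw [PySem.Set.add_of_not_mem hmem]
        have : (p.1 == w) = false := by simpa using hw
        simp [List.filter_append, this]

-- the per-word prediction: A's in-loop max equals B's best-index lookup
lemma per_word (ps : List (String × String)) (t_max : String) (w : String) :
    (match (List.foldl aStep (PySem.Dict.empty, PySem.Dict.empty) ps).1.get? w with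
      | some c =>
        match PySem.List.max? c.keys (fun k => c.getD k 0) with
        | some max_t => max_t
        | none => t_max
      | none => t_max)
    = (match (List.foldl bStep PySem.Dict.empty (PySem.Dict.counter ps).items).get? w with
      | some q => q.1
      | none => t_max) := by
  rw [aFold_fst_get?, bFold_get?, PySem.Dict.items_counter, List.filter_map]
  have hcomp : ((fun p => p.1.1 == w) ∘ (fun k => (k, (List.count k ps : Int))))
      = fun (k : String × String) => k.1 == w := rfl
  rw [hcomp, List.map_map]
  by_cases hmem : w ∈ ps.map Prod.fst
  · -- w was seen in training
    have hfilmap :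
        (((PySem.Set.ofList ps).filter (fun k => k.1 == w)).map
          ((fun p => (p.1.2, p.2)) ∘ (fun k => (k, (List.count k ps : Int)))))
        = ((PySem.Set.ofList ps).filter (fun k => k.1 == w)).map
            (fun k => (k.2, (List.count k.2 (tagsOf ps w) : Int))) := by
      apply List.map_congr_left
      intro k hk
      have hk1 : k.1 = w := by simpa using (List.mem_filter.1 hk).2
      have : k = (w, k.2) := by cases k; simp_all
      simp only [Function.comp]
      rw [this, count_pair ps w k.2]
    rw [hfilmap]
    have hmm : ((PySem.Set.ofList ps).filter (fun k => k.1 == w)).map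
          (fun k => (k.2, (List.count k.2 (tagsOf ps w) : Int)))
        = (PySem.Set.ofList (tagsOf ps w)).map
            (fun t => (t, (List.count t (tagsOf ps w) : Int))) := by
      rw [← ofList_filter_map, List.map_map]; rfl
    rw [hmm, max?_map]
    have hkeys : (PySem.Dict.counter (tagsOf ps w)).keys = PySem.Set.ofList (tagsOf ps w) :=
      PySem.Dict.keys_counter _
    have hkey : (fun k => (PySem.Dict.counter (tagsOf ps w)).getD k 0)
        = fun t => ((List.count t (tagsOf ps w) : Nat) : Int) := by
      funext t; exact PySem.Dict.getD_counter _ t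
    have htne : tagsOf ps w ≠ [] := by
      obtain ⟨p, hp, hp1⟩ := List.mem_map.1 hmem
      have : p.2 ∈ tagsOf ps w :=
        List.mem_map_of_mem (List.mem_filter.2 ⟨hp, by simp [hp1]⟩)
      exact fun h => by simp [h] at this
    have hsne : PySem.Set.ofList (tagsOf ps w) ≠ [] := by
      obtain ⟨t, ht⟩ := List.exists_mem_of_ne_nil _ htne
      have : t ∈ PySem.Set.ofList (tagsOf ps w) := (PySem.Set.mem_ofList _ _).2 ht
      exact fun h => by simp [h] at this
    simp only [if_pos hmem, hkeys, hkey]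
    cases hmx : PySem.List.max? (PySem.Set.ofList (tagsOf ps w))
        (fun t => ((List.count t (tagsOf ps w) : Nat) : Int)) with
    | none => exact absurd hmx (max?_ne_none _ _ hsne)
    | some m => simp
  · -- unseen word: both fall back to t_max
    have hfil : (PySem.Set.ofList ps).filter (fun k => k.1 == w) = [] := by
      apply List.filter_eq_nil_iff.2
      intro k hk
      have hk' : k ∈ ps := (PySem.Set.mem_ofList _ _).1 hk
      simp only [beq_iff_eq]
      exact fun h => hmem (h ▸ List.mem_map_of_mem (f := Prod.fst) hk')
    rw [hfil]
    simp [PySem.List.max?, if_neg hmem]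

-- ===== VERDICT (by name: the statement is the Claim_ definition above) =====
theorem baseline_spec : Claim_equal_baseline := by
  intro train test _hdom _hpre
  unfold Spec_baseline baseline baseline_alt
  simp only []
  -- A's nested training fold is the flat fold over train.flatten
  rw [show (train.foldl (fun st sentence => sentence.foldl aStep st)
        (PySem.Dict.empty, PySem.Dict.empty))
      = List.foldl aStep (PySem.Dict.empty, PySem.Dict.empty) train.flatten from
    (List.foldl_flatten).symm]
  -- the two tag counters coincide
  have htag : (List.foldl aStep (PySem.Dict.empty, PySem.Dict.empty) train.flatten).2
      = PySem.Dict.counter (train.flatten.map Prod.snd) := by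
    rw [aFold_snd, PySem.Dict.counter_eq_foldl]
  rw [htag]
  cases hmx : PySem.List.max? (PySem.Dict.counter (train.flatten.map Prod.snd)).keys
      (fun k => (PySem.Dict.counter (train.flatten.map Prod.snd)).getD k 0) with
  | none => rfl
  | some t_max =>
    -- A's appending folds over test are maps; then compare per word
    have hinner : ∀ sent : List String,
        List.foldl (fun tag_pred word =>
          match (List.foldl aStep (PySem.Dict.empty, PySem.Dict.empty) train.flatten).1.get? word with
          | some c =>
            match PySem.List.max? c.keys (fun k => c.getD k 0) with
            | some max_t => tag_pred ++ [(word, max_t)]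
            | none => tag_pred ++ [(word, t_max)]
          | none => tag_pred ++ [(word, t_max)]) [] sent
        = sent.map (fun word =>
            (word, match (List.foldl bStep PySem.Dict.empty
                     (PySem.Dict.counter train.flatten).items).get? word with
                   | some q => q.1
                   | none => t_max)) := by
      intro sent
      have hfun : (fun (tag_pred : List (String × String)) word =>
          match (List.foldl aStep (PySem.Dict.empty, PySem.Dict.empty) train.flatten).1.get? word with
          | some c =>
            match PySem.List.max? c.keys (fun k => c.getD k 0) with
            | some max_t => tag_pred ++ [(word, max_t)]
            | none => tag_pred ++ [(word, t_max)]
          | none => tag_pred ++ [(word, t_max)])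
        = fun (tag_pred : List (String × String)) word => tag_pred ++
            [(word, match (List.foldl bStep PySem.Dict.empty
                      (PySem.Dict.counter train.flatten).items).get? word with
                    | some q => q.1
                    | none => t_max)] := by
        funext tag_pred word
        have h := per_word train.flatten t_max word
        cases hO : (List.foldl aStep (PySem.Dict.empty, PySem.Dict.empty) train.flatten).1.get? word with
        | none =>
          rw [hO] at h
          simp only [] at h
          simp [← h]
        | some c =>
          rw [hO] at h
          simp only [] at h
          simp only []
          cases hM : PySem.List.max? c.keys (fun k => c.getD k 0) with
          | none => rw [hM] at h; simp [← h]
          | some max_t => rw [hM] at h; simp [← h]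
      rw [hfun]
      simpa using PySem.List.foldl_append_singleton_eq_map _ sent []
    have houter := PySem.List.foldl_append_singleton_eq_map
      (fun sent : List String =>
        sent.map (fun word =>
          (word, match (List.foldl bStep PySem.Dict.empty
                   (PySem.Dict.counter train.flatten).items).get? word with
                 | some q => q.1
                 | none => t_max))) test []
    simp only [List.nil_append] at houter
    calc List.foldl (fun predicts sentence => predicts ++ [List.foldl _ [] sentence]) [] test
        = List.foldl (fun predicts sentence => predicts ++
            [sentence.map (fun word =>
              (word, match (List.foldl bStep PySem.Dict.empty
                       (PySem.Dict.counter train.flatten).items).get? word with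
                     | some q => q.1
                     | none => t_max))]) [] test := by
          congr 1
          funext predicts sentence
          rw [hinner sentence]
      _ = _ := by rw [houter]
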